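-- pv_equiv track=rewrite | github.com/TG-WinG/2022_Web-Python_Education | 4. 리스트, 반복문/과제/4week_assignment_marker.py | stock_price
-- ===== SOURCE A (Python) =====
-- def stock_price(stockChart):
--     answer = str()
--     lowPoint = 0
--     lowDay = 0
--     price = 0
--     day = len(stockChart) - 1
--
--     for i in stockChart:
--         price += i
--         if lowPoint >= price:
--             lowPoint = price
--             lowDay = day
--         day -= 1
--
--     if lowPoint >= 0:
--         answer = "아니야 조금만 더 기다려"
--
--     else:
--         answer = "%s일 전에 샀어야지 으이구" %lowDay
--
--     return answer
-- ===== SOURCE B (Python) =====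
-- def stock_price(stockChart):
--     # Phase 1: build the table of cumulative prefix sums.
--     prefix = []
--     total = 0
--     for p in stockChart:
--         total += p
--         prefix.append(total)
--     # Phase 2: scan the table.
--     if not prefix or min(prefix) >= 0:
--         return "아니야 조금만 더 기다려"
--     m = min(prefix)
--     day = list(reversed(prefix)).index(m)
--     return "%s일 전에 샀어야지 으이구" % day
-- ===== Notes on version B (the rewrite author's own statement) =====
-- stated objective: alternative
-- what changed: A fuses prefix-summing and running-min/day tracking into one loop with four mutable variables; B splits it into two phases: build the full prefix-sum table, then take min() of the table and locate the answer day as the first index of that minimum in the reversed table (reproducing A's >=-tie-break).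
import Mathlib
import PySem

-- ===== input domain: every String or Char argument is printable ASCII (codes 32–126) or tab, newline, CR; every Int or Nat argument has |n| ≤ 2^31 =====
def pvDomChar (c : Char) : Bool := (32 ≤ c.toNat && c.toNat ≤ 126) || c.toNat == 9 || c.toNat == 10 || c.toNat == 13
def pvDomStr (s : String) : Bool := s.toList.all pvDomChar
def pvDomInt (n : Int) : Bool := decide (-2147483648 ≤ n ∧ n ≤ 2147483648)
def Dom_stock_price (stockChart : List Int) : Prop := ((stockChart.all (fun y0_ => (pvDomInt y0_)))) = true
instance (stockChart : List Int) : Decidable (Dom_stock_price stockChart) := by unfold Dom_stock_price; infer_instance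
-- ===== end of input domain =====

-- B rebuilds A's fused running-min loop as two phases — build the full prefix-sum table, then min + reverse-index scan — for clarity (objective: alternative).

-- ===== PORT A =====
-- loop body of A: state (lowPoint, lowDay, price, day)
def pvAstep : (Int × Int × Int × Int) → Int → (Int × Int × Int × Int)
  | (lp, ld, price, day), i =>
    let p := price + i
    if lp ≥ p then (p, day, p, day - 1) else (lp, ld, p, day - 1)

def stock_price (stockChart : List Int) : String :=
  let r := stockChart.foldl pvAstep (0, 0, 0, (stockChart.length : Int) - 1)
  if r.1 ≥ 0 then "아니야 조금만 더 기다려"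
  else PySem.Int.toStr r.2.1 ++ "일 전에 샀어야지 으이구"

-- ===== PORT B =====
-- loop body of B's table-building pass: state (prefix, total)
def pvBstep : (List Int × Int) → Int → (List Int × Int)
  | (acc, total), p => (acc ++ [total + p], total + p)

def stock_price_alt (stockChart : List Int) : String :=
  let pfx := (stockChart.foldl pvBstep ([], 0)).1
  if pfx.isEmpty then "아니야 조금만 더 기다려"
  else
    let m := (PySem.List.min? pfx (fun y => y)).getD 0  -- min? = some _ : pfx is nonempty
    if m ≥ 0 then "아니야 조금만 더 기다려"
    else
      -- index? cannot fail: the minimum is a member of pfx.reverse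
      PySem.Int.toStr (((PySem.List.index? pfx.reverse m).getD 0 : Nat) : Int) ++ "일 전에 샀어야지 으이구"

-- ===== PRECONDITION & SPEC =====
def Spec_stock_price (stockChart : List Int) (out : String) : Prop := out = stock_price_alt stockChart
instance (stockChart : List Int) (out : String) : Decidable (Spec_stock_price stockChart out) := by unfold Spec_stock_price; infer_instance

-- ===== CLAIM (what is proved, stated in full; the proofs are below) =====
def Claim_equal_stock_price : Prop := ∀ (stockChart : List Int), Dom_stock_price stockChart → Spec_stock_price stockChart (stock_price stockChart)

-- ===== LEMMAS AND PROOFS =====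

-- cumulative prefix sums of a list, starting from running total t
def prefs : Int → List Int → List Int
  | _, [] => []
  | t, x :: xs => (t + x) :: prefs (t + x) xs

lemma prefs_length (xs : List Int) : ∀ t, (prefs t xs).length = xs.length := by
  induction xs with
  | nil => intro t; rfl
  | cons x rest ih => intro t; simp [prefs, ih]

lemma foldl_min_le_init (l : List Int) : ∀ a, l.foldl min a ≤ a := by
  induction l with
  | nil => intro a; simp
  | cons x t ih => intro a; exact le_trans (ih (min a x)) (min_le_left a x)

lemma foldl_min_le_mem (l : List Int) : ∀ a q, q ∈ l → l.foldl min a ≤ q := by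
  induction l with
  | nil => intro a q h; simp at h
  | cons x t ih =>
    intro a q h
    rcases List.mem_cons.mp h with h | h
    · subst h; exact le_trans (foldl_min_le_init t (min a q)) (min_le_right a q)
    · exact ih (min a x) q h

lemma foldl_min_self_or_mem (l : List Int) : ∀ a, l.foldl min a = a ∨ l.foldl min a ∈ l := by
  induction l with
  | nil => intro a; left; rfl
  | cons x t ih =>
    intro a
    rcases ih (min a x) with h | h
    · rcases le_total a x with hax | hax
      · left; simpa [min_eq_left hax] using h
      · right
        have hx : (x :: t).foldl min a = x := by simpa [min_eq_right hax] using h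
        simp [hx]
    · right; exact List.mem_cons_of_mem x h

lemma foldl_min_self (l : List Int) (a : Int) (h : ∀ q ∈ l, a ≤ q) : l.foldl min a = a := by
  rcases foldl_min_self_or_mem l a with h1 | h1
  · exact h1
  · exact le_antisymm (foldl_min_le_init l a) (h _ h1)

lemma foldl_min_mem (l : List Int) (a : Int) (h : ∃ q ∈ l, q ≤ a) : l.foldl min a ∈ l := by
  rcases foldl_min_self_or_mem l a with h1 | h1
  · rcases h with ⟨q, hq, hqa⟩
    have h2 := foldl_min_le_mem l a q hq
    rw [h1] at h2
    have hqe : q = a := le_antisymm hqa h2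
    rw [h1, ← hqe]; exact hq
  · exact h1

lemma foldl_min_split (l : List Int) : ∀ a b, l.foldl min (min a b) = min a (l.foldl min b) := by
  induction l with
  | nil => intro a b; rfl
  | cons x t ih =>
    intro a b
    simp only [List.foldl_cons, min_assoc, ih]

lemma afold_char (xs : List Int) : ∀ (lp ld price day : Int),
    xs.foldl pvAstep (lp, ld, price, day) =
      ((prefs price xs).foldl min lp,
       (if ∃ q ∈ prefs price xs, q ≤ lp then
          day - ((xs.length : Int) - 1) + (((PySem.List.index? (prefs price xs).reverse ((prefs price xs).foldl min lp)).getD 0 : Nat) : Int)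
        else ld),
       price + xs.sum,
       day - xs.length) := by
  induction xs with
  | nil =>
    intro lp ld price day
    simp [prefs]
  | cons x rest ih =>
    intro lp ld price day
    have hLrev : (prefs (price + x) rest).reverse.length = rest.length := by
      simp [prefs_length]
    simp only [List.foldl_cons, pvAstep]
    by_cases hc : lp ≥ price + x
    · rw [if_pos hc, ih]
      have hmin : min lp (price + x) = price + x := min_eq_right hc
      have hcond : ∃ q ∈ prefs price (x :: rest), q ≤ lp :=
        ⟨price + x, by simp [prefs], hc⟩
      rw [if_pos hcond]
      by_cases hA : ∃ q ∈ prefs (price + x) rest, q ≤ price + x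
      · rw [if_pos hA]
        have hm : (prefs (price + x) rest).foldl min (price + x) ∈ prefs (price + x) rest :=
          foldl_min_mem _ _ hA
        simp only [prefs, List.foldl_cons, List.reverse_cons, hmin,
          PySem.List.index?_append_of_mem _ (List.mem_reverse.mpr hm)]
        simp only [Prod.mk.injEq, List.length_cons, List.sum_cons, true_and]
        refine ⟨by push_cast; ring, by ring, by push_cast; ring⟩
      · rw [if_neg hA]
        push Not at hA
        have hmm : (prefs (price + x) rest).foldl min (price + x) = price + x :=
          foldl_min_self _ _ (fun q hq => le_of_lt (hA q hq))
        have hnot : (price + x) ∉ (prefs (price + x) rest).reverse := by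
          rw [List.mem_reverse]
          intro hmem
          exact absurd le_rfl (not_le.mpr (hA _ hmem))
        simp only [prefs, List.foldl_cons, List.reverse_cons, hmin, hmm,
          PySem.List.index?_append_singleton_self _ _ hnot]
        simp only [Prod.mk.injEq, List.length_cons, List.sum_cons, Option.getD_some, hLrev, true_and]
        refine ⟨by push_cast; ring, by ring, by push_cast; ring⟩
    · rw [if_neg hc, ih]
      have hlt : lp < price + x := lt_of_not_ge hc
      have hmin : min lp (price + x) = lp := min_eq_left (le_of_lt hlt)
      by_cases hA : ∃ q ∈ prefs (price + x) rest, q ≤ lp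
      · rw [if_pos hA]
        have hcond : ∃ q ∈ prefs price (x :: rest), q ≤ lp := by
          obtain ⟨q, hq, hqle⟩ := hA
          exact ⟨q, by simp [prefs, hq], hqle⟩
        rw [if_pos hcond]
        have hm : (prefs (price + x) rest).foldl min lp ∈ prefs (price + x) rest :=
          foldl_min_mem _ _ hA
        simp only [prefs, List.foldl_cons, List.reverse_cons, hmin,
          PySem.List.index?_append_of_mem _ (List.mem_reverse.mpr hm)]
        simp only [Prod.mk.injEq, List.length_cons, List.sum_cons, true_and]
        refine ⟨by push_cast; ring, by ring, by push_cast; ring⟩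
      · rw [if_neg hA]
        have hcond : ¬ ∃ q ∈ prefs price (x :: rest), q ≤ lp := by
          push Not at hA ⊢
          intro q hq
          simp only [prefs, List.mem_cons] at hq
          rcases hq with h | h
          · subst h; exact hlt
          · exact hA q h
        rw [if_neg hcond]
        simp only [prefs, List.foldl_cons, hmin]
        simp only [Prod.mk.injEq, List.length_cons, List.sum_cons, true_and]
        refine ⟨by ring, by push_cast; ring⟩

-- B's table-building pass produces exactly the prefix-sum table
lemma bfold_char (xs : List Int) : ∀ (acc : List Int) (t : Int),
    xs.foldl pvBstep (acc, t) = (acc ++ prefs t xs, t + xs.sum) := by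
  induction xs with
  | nil => intro acc t; simp [prefs]
  | cons x rest ih => intro acc t; simp [pvBstep, prefs, ih]; ring

-- ===== VERDICT (by name: the statement is the Claim_ definition above) =====
theorem stock_price_spec : Claim_equal_stock_price := by
  unfold Claim_equal_stock_price Spec_stock_price
  intro xs _
  cases xs with
  | nil => rfl
  | cons x rest =>
    simp only [stock_price, stock_price_alt]
    rw [afold_char, bfold_char]
    simp only [List.nil_append, prefs, List.foldl_cons, PySem.List.min?_id_cons,
      Option.getD_some, List.isEmpty_cons, List.reverse_cons, List.length_cons,
      Bool.false_eq_true, if_false]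
    rw [foldl_min_split]
    by_cases hge : (prefs (0 + x) rest).foldl min (0 + x) ≥ 0
    · rw [if_pos (le_min le_rfl hge), if_pos hge]
    · have hmlt : (prefs (0 + x) rest).foldl min (0 + x) < 0 := lt_of_not_ge hge
      have h1 : ¬ min 0 ((prefs (0 + x) rest).foldl min (0 + x)) ≥ 0 :=
        not_le.mpr (lt_of_le_of_lt (min_le_right _ _) hmlt)
      have hmin0 : min 0 ((prefs (0 + x) rest).foldl min (0 + x)) =
          (prefs (0 + x) rest).foldl min (0 + x) := min_eq_right (le_of_lt hmlt)
      have hmem : (prefs (0 + x) rest).foldl min (0 + x) ∈ (0 + x) :: prefs (0 + x) rest := by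
        rcases foldl_min_self_or_mem (prefs (0 + x) rest) (0 + x) with h | h
        · rw [h]; exact List.mem_cons_self
        · exact List.mem_cons_of_mem _ h
      have hcond : ∃ q ∈ (0 + x) :: prefs (0 + x) rest, q ≤ 0 :=
        ⟨_, hmem, le_of_lt hmlt⟩
      rw [if_neg h1, if_neg hge, if_pos hcond, hmin0]
      congr 1
      push_cast
      ring_nf
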